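-- pv_equiv track=rewrite | github.com/raouf-zobir/Tatweer-Hackathon | code/backend/AI-Voice-assistant/src/agents/agent.py | batch_similar_operations
-- ===== SOURCE A (Python) =====
-- def batch_similar_operations(operations):
--     """Batch similar operations together to reduce API calls"""
--     batched = {}
--     for op in operations:
--         key = f"{op['tool']}_{op['action']}"
--         if key not in batched:
--             batched[key] = []
--         batched[key].append(op)
--     return batched
-- ===== SOURCE B (Python) =====
-- def batch_similar_operations(operations):
--     """Batch similar operations together to reduce API calls"""
--     keys = []
--     for op in operations:
--         key = f"{op['tool']}_{op['action']}"
--         if key not in keys: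
--             keys.append(key)
--     return {key: [op for op in operations
--                   if f"{op['tool']}_{op['action']}" == key]
--             for key in keys}
-- ===== Notes on version B (the rewrite author's own statement) =====
-- stated objective: alternative
-- what changed: B first collects the distinct tool_action keys in order of first appearance, then builds each group by an independent filter pass over the input, instead of A's single-pass bucketing into a dict that is grown and mutated as it scans.
import Mathlib
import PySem

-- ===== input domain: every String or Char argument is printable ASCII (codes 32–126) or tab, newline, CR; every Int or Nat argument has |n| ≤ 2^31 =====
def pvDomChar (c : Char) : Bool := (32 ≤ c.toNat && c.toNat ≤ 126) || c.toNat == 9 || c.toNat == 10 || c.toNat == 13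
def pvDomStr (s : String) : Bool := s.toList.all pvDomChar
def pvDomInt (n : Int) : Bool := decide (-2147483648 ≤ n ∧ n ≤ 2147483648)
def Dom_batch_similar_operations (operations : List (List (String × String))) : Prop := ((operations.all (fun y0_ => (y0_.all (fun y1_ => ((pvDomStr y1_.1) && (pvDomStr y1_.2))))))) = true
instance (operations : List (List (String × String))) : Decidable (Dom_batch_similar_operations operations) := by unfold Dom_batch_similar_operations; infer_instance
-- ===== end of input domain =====

-- B groups by collecting the distinct keys first and then filtering the input once per key,
-- instead of A's single-pass mutation of a growing dict; same return value, no speed claim.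

-- key = f"{op['tool']}_{op['action']}" (dict lookup = first match in the association list)
def pvKey (op : List (String × String)) : String :=
  (PySem.Dict.mk op).getD "tool" "" ++ "_" ++ (PySem.Dict.mk op).getD "action" ""

-- ===== PORT A =====
def batch_similar_operations (operations : List (List (String × String))) : List (String × List (List (String × String))) :=
  (operations.foldl
    (fun batched op =>
      let key := pvKey op
      let batched := if batched.contains key = false then batched.insert key ([] : List (List (String × String))) else batched
      batched.modify key [] (fun l => l ++ [op]))
    PySem.Dict.empty).items

-- ===== PORT B =====
def batch_similar_operations_alt (operations : List (List (String × String))) : List (String × List (List (String × String))) :=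
  let keys := operations.foldl (fun ks op => if pvKey op ∈ ks then ks else ks ++ [pvKey op]) []
  keys.map (fun k => (k, operations.filter (fun op => pvKey op == k)))

-- ===== PRECONDITION & SPEC =====
-- Pre_ excludes operations missing the 'tool' or 'action' key, on which the Python A raises KeyError.
def Pre_batch_similar_operations (operations : List (List (String × String))) : Prop :=
  (operations.all (fun op => (PySem.Dict.mk op).contains "tool" && (PySem.Dict.mk op).contains "action")) = true
instance (operations : List (List (String × String))) : Decidable (Pre_batch_similar_operations operations) := by unfold Pre_batch_similar_operations; infer_instance

def pvWitness_batch_similar_operations : (List (List (String × String))) :=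
  [[("tool", "db"), ("action", "read")], [("tool", "db"), ("action", "write")], [("tool", "db"), ("action", "read")]]

def Spec_batch_similar_operations (operations : List (List (String × String))) (out : List (String × List (List (String × String)))) : Prop := out = batch_similar_operations_alt operations
instance (operations : List (List (String × String))) (out : List (String × List (List (String × String)))) : Decidable (Spec_batch_similar_operations operations out) := by unfold Spec_batch_similar_operations; infer_instance

-- ===== CLAIM (what is proved, stated in full; the proofs are below) =====
def Claim_equal_batch_similar_operations : Prop := ∀ (operations : List (List (String × String))), Dom_batch_similar_operations operations → Pre_batch_similar_operations operations → Spec_batch_similar_operations operations (batch_similar_operations operations)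

-- ===== LEMMAS AND PROOFS =====

-- A's loop body: the "if key not in batched: batched[key] = []" guard followed by the append
-- is one `modify` with default [].
lemma stepA_eq_modify (d : PySem.Dict String (List (List (String × String)))) (k : String)
    (op : List (String × String)) :
    (if d.contains k = false then d.insert k ([] : List (List (String × String))) else d).modify k []
        (fun l => l ++ [op])
      = d.modify k [] (fun l => l ++ [op]) := by
  by_cases h : d.contains k = false
  · simp only [h, if_pos, PySem.Dict.modify]
    have h0 : d.getD k ([] : List (List (String × String))) = [] :=
      PySem.Dict.getD_of_not_contains d [] h
    rw [PySem.Dict.getD_insert_self, PySem.Dict.insert_insert_self, h0]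
  · simp [h]

-- A's whole fold, with the guarded body replaced by the single `modify`.
lemma foldA_eq (operations : List (List (String × String))) :
    operations.foldl
      (fun batched op =>
        let key := pvKey op
        let batched := if batched.contains key = false then batched.insert key ([] : List (List (String × String))) else batched
        batched.modify key [] (fun l => l ++ [op]))
      PySem.Dict.empty
    = operations.foldl
        (fun d op => d.modify (pvKey op) [] (fun l => l ++ [op])) PySem.Dict.empty :=
  PySem.List.foldl_congr_mem _ _ _ _ (fun acc x _ => stepA_eq_modify acc (pvKey x) x)

theorem batch_similar_operations_spec_aux (operations : List (List (String × String))) :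
    batch_similar_operations operations = batch_similar_operations_alt operations := by
  unfold batch_similar_operations batch_similar_operations_alt
  rw [foldA_eq]
  set D := operations.foldl
      (fun d op => d.modify (pvKey op) [] (fun l => l ++ [op])) PySem.Dict.empty with hD
  have hnd : D.keys.Nodup :=
    PySem.Dict.nodup_keys_foldl_modify_key operations pvKey []
      (fun _ op => fun l => l ++ [op]) PySem.Dict.empty PySem.Dict.nodup_keys_empty
  have hkeys : D.keys = PySem.Set.ofList (operations.map pvKey) := by
    have := PySem.Dict.keys_foldl_modify_key operations pvKey []
      (fun _ op => fun l => l ++ [op]) PySem.Dict.empty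
    simpa [PySem.Set.update_nil_left] using this
  have hgetD : ∀ k, D.getD k [] = operations.filter (fun op => pvKey op == k) := by
    intro k
    have hpair : D = (operations.map (fun op => (pvKey op, op))).foldl
        (fun d p => d.modify p.1 [] (fun l => l ++ [p.2])) PySem.Dict.empty := by
      rw [hD, List.foldl_map]
    rw [hpair, PySem.Dict.getD_foldl_modify_append, List.filter_map, List.map_map]
    simp [Function.comp_def]
  have hB : operations.foldl (fun ks op => if pvKey op ∈ ks then ks else ks ++ [pvKey op]) []
      = PySem.Set.ofList (operations.map pvKey) := by
    rw [PySem.List.foldl_congr_mem _ _ (fun ks op => PySem.Set.add ks (pvKey op)) []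
        (fun acc x _ => by simp [PySem.Set.add_eq_ite]),
      ← PySem.Set.update_map_eq_foldl_add, PySem.Set.update_nil_left]
  rw [hB, PySem.Dict.items_eq_map_keys D hnd [], hkeys]
  exact List.map_congr_left (fun k _ => by rw [hgetD k])

-- ===== VERDICT (by name: the statement is the Claim_ definition above) =====
theorem batch_similar_operations_spec : Claim_equal_batch_similar_operations := by
  intro operations _ _
  exact batch_similar_operations_spec_aux operations
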